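-- pv_equiv track=rewrite | github.com/tyctor/codeadvent2023 | day6/part2.py | find_better_races
-- ===== SOURCE A (Python) =====
-- def find_better_races(race_time, best_distance):
--     better_races = []
--     for charging in range(race_time):
--         moving = race_time - charging
--         distance = moving * charging
--         if distance > best_distance:
--             better_races.append(distance)
--     return better_races
-- ===== SOURCE B (Python) =====
-- def _isqrt(n):
--     # largest r with r*r <= n, for n >= 0 (binary search)
--     lo, hi = 0, n + 1
--     while hi - lo > 1:
--         mid = (lo + hi) // 2
--         if mid * mid <= n:
--             lo = mid
--         else:
--             hi = mid
--     return lo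
--
--
-- def find_better_races(race_time, best_distance):
--     # charging*(race_time-charging) > best_distance  <=>  (2*charging-race_time)^2 < d
--     d = race_time * race_time - 4 * best_distance
--     if d <= 0:
--         return []
--     r = _isqrt(d - 1)
--     lo = max((race_time - r + 1) // 2, 0)
--     hi = min((race_time + r) // 2, race_time - 1)
--     return [charging * (race_time - charging) for charging in range(lo, hi + 1)]
-- ===== Notes on version B (the rewrite author's own statement) =====
-- stated objective: alternative
-- what changed: B replaces A's scan of every charging value in range(race_time) by a closed-form computation of the winning interval (integer square root of the discriminant race_time^2-4*best_distance, verified with exact integer arithmetic), then builds only the winning distances in the same increasing-charging order.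
import Mathlib
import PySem

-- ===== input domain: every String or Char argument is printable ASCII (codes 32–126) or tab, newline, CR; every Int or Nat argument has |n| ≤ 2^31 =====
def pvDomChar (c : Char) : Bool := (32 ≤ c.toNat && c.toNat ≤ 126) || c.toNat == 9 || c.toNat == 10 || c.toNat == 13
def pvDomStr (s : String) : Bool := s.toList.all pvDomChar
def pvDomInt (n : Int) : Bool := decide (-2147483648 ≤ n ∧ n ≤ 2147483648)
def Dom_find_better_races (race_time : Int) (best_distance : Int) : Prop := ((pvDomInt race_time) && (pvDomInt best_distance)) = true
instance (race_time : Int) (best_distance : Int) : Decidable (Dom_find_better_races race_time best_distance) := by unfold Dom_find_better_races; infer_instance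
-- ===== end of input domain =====

-- B replaces A's full scan of range(race_time) by a closed-form winning interval
-- (integer sqrt of the discriminant) and only builds the winning distances.


-- ===== PORT A =====
def find_better_races (race_time : Int) (best_distance : Int) : List Int :=
  (PySem.List.pyRange 0 race_time 1).foldl
    (fun better_races charging =>
      let moving := race_time - charging
      let distance := moving * charging
      if distance > best_distance then better_races ++ [distance] else better_races)
    []

-- ===== PORT B =====
-- port of Source B's _isqrt binary-search loop (while hi - lo > 1)
def isqrtLoop (n lo hi : Int) : Int :=
  if _h : hi - lo > 1 then
    let mid := PySem.Int.floordiv (lo + hi) 2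
    if mid * mid ≤ n then isqrtLoop n mid hi else isqrtLoop n lo mid
  else lo
termination_by (hi - lo).toNat
decreasing_by
  · have := PySem.Int.floordiv_eq_ediv_of_pos (a := lo + hi) (b := 2) (by omega)
    simp only [mid, this] at *; omega
  · have := PySem.Int.floordiv_eq_ediv_of_pos (a := lo + hi) (b := 2) (by omega)
    simp only [mid, this] at *; omega

def pyIsqrt (n : Int) : Int := isqrtLoop n 0 (n + 1)

def find_better_races_alt (race_time : Int) (best_distance : Int) : List Int :=
  let d := race_time * race_time - 4 * best_distance
  if d ≤ 0 then []
  else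
    let r := pyIsqrt (d - 1)
    let lo := max (PySem.Int.floordiv (race_time - r + 1) 2) 0
    let hi := min (PySem.Int.floordiv (race_time + r) 2) (race_time - 1)
    (PySem.List.pyRange lo (hi + 1) 1).map (fun charging => charging * (race_time - charging))

-- ===== PRECONDITION & SPEC =====
def Spec_find_better_races (race_time : Int) (best_distance : Int) (out : List Int) : Prop := out = find_better_races_alt race_time best_distance
instance (race_time : Int) (best_distance : Int) (out : List Int) : Decidable (Spec_find_better_races race_time best_distance out) := by unfold Spec_find_better_races; infer_instance

-- ===== CLAIM (what is proved, stated in full; the proofs are below) =====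
def Claim_equal_find_better_races : Prop := ∀ (race_time : Int) (best_distance : Int), Dom_find_better_races race_time best_distance → Spec_find_better_races race_time best_distance (find_better_races race_time best_distance)

-- ===== LEMMAS AND PROOFS =====

-- invariant of the binary-search loop: the result r satisfies r² ≤ n < (r+1)²
theorem isqrtLoop_bounds (n lo hi : Int) (h1 : lo * lo ≤ n) (h2 : n < hi * hi)
    (h3 : 0 ≤ lo) (h4 : lo < hi) :
    isqrtLoop n lo hi * isqrtLoop n lo hi ≤ n ∧
      n < (isqrtLoop n lo hi + 1) * (isqrtLoop n lo hi + 1) := by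
  fun_induction isqrtLoop n lo hi with
  | case1 lo hi h mid hle ih =>
    have hd := PySem.Int.floordiv_eq_ediv_of_pos (a := lo + hi) (b := 2) (by omega)
    exact ih hle h2 (by simp only [mid, hd] at *; omega) (by simp only [mid, hd] at *; omega)
  | case2 lo hi h mid hgt ih =>
    have hd := PySem.Int.floordiv_eq_ediv_of_pos (a := lo + hi) (b := 2) (by omega)
    exact ih h1 (by omega) h3 (by simp only [mid, hd] at *; omega)
  | case3 lo hi h =>
    have : hi = lo + 1 := by omega
    subst this
    exact ⟨h1, h2⟩

theorem pyIsqrt_bounds (n : Int) (hn : 0 ≤ n) :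
    pyIsqrt n * pyIsqrt n ≤ n ∧ n < (pyIsqrt n + 1) * (pyIsqrt n + 1) ∧ 0 ≤ pyIsqrt n := by
  have h := isqrtLoop_bounds n 0 (n + 1) (by simpa) (by nlinarith) le_rfl (by omega)
  unfold pyIsqrt
  refine ⟨h.1, h.2, ?_⟩
  by_contra hneg
  push Not at hneg
  nlinarith [h.1, h.2]

-- filtering an interval predicate out of a unit-step range is a sub-range
theorem filter_pyRange_interval (lo hi : Int) :
    ∀ (a b : Int),
      (PySem.List.pyRange a b 1).filter (fun c => decide (lo ≤ c ∧ c ≤ hi)) =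
        PySem.List.pyRange (max a lo) (min b (hi + 1)) 1 := by
  intro a b
  generalize hn : (b - a).toNat = n
  induction n generalizing a with
  | zero =>
    rw [PySem.List.pyRange_one_eq_nil (by omega), PySem.List.pyRange_one_eq_nil (by omega)]
    rfl
  | succ k ih =>
    have hab : a < b := by omega
    rw [PySem.List.pyRange_one_cons hab]
    have ihr := ih (a + 1) (by omega)
    by_cases hp : lo ≤ a ∧ a ≤ hi
    · have e1 : max a lo = a := by omega
      have e2 : max (a + 1) lo = a + 1 := by omega
      rw [List.filter_cons_of_pos (by simpa using hp), ihr, e1, e2,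
        ← PySem.List.pyRange_one_cons (lt_min (by omega) (by omega))]
    · rw [List.filter_cons_of_neg (by simpa using hp), ihr]
      rcases (by omega : a < lo ∨ hi < a) with hlt | hgt
      · have e : max (a + 1) lo = max a lo := by omega
        rw [e]
      · have h1 : min b (hi + 1) ≤ max (a + 1) lo :=
          le_trans (min_le_right _ _) (le_trans (by omega) (le_max_left _ _))
        have h2 : min b (hi + 1) ≤ max a lo :=
          le_trans (min_le_right _ _) (le_trans (by omega) (le_max_left _ _))
        rw [PySem.List.pyRange_one_eq_nil h1, PySem.List.pyRange_one_eq_nil h2]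

-- ===== VERDICT (by name: the statement is the Claim_ definition above) =====
theorem find_better_races_spec : Claim_equal_find_better_races := by
  intro t b _
  unfold Spec_find_better_races find_better_races find_better_races_alt
  have hA : (PySem.List.pyRange 0 t 1).foldl
      (fun acc c =>
        let moving := t - c
        let distance := moving * c
        if distance > b then acc ++ [distance] else acc) [] =
      ((PySem.List.pyRange 0 t 1).filter (fun c => decide ((t - c) * c > b))).map
        (fun c => (t - c) * c) := by
    simpa using PySem.List.foldl_append_ite (p := fun c : Int => (t - c) * c > b)
      (f := fun c : Int => (t - c) * c) (l := PySem.List.pyRange 0 t 1) (acc := ([] : List Int))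
  rw [hA]
  by_cases hd : t * t - 4 * b ≤ 0
  · simp only [hd, if_pos]
    have hnil : (PySem.List.pyRange 0 t 1).filter (fun c => decide ((t - c) * c > b)) = [] := by
      refine List.filter_eq_nil_iff.mpr (fun c _ => ?_)
      simp only [decide_eq_true_eq, not_lt]
      nlinarith [sq_nonneg (2 * c - t)]
    rw [hnil, List.map_nil]
  · simp only [hd, if_false]
    have hr := pyIsqrt_bounds (t * t - 4 * b - 1) (by omega)
    set r := pyIsqrt (t * t - 4 * b - 1) with hrdef
    obtain ⟨hr1, hr2, hr0⟩ := hr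
    have hfd1 := PySem.Int.floordiv_eq_ediv_of_pos (a := t - r + 1) (b := 2) (by omega)
    have hfd2 := PySem.Int.floordiv_eq_ediv_of_pos (a := t + r) (b := 2) (by omega)
    have key : ∀ c : Int, ((t - c) * c > b) ↔
        (PySem.Int.floordiv (t - r + 1) 2 ≤ c ∧ c ≤ PySem.Int.floordiv (t + r) 2) := by
      intro c
      rw [hfd1, hfd2]
      have step1 : ((t - c) * c > b) ↔
          (2 * c - t) * (2 * c - t) ≤ t * t - 4 * b - 1 := by
        constructor
        · intro h; nlinarith
        · intro h; nlinarith
      have step2 : (2 * c - t) * (2 * c - t) ≤ t * t - 4 * b - 1 ↔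
          (-r ≤ 2 * c - t ∧ 2 * c - t ≤ r) := by
        constructor
        · intro h
          constructor
          · by_contra hc
            push Not at hc
            nlinarith
          · by_contra hc
            push Not at hc
            nlinarith
        · intro h
          nlinarith [mul_nonneg (by omega : (0:Int) ≤ r - (2 * c - t))
            (by omega : (0:Int) ≤ r + (2 * c - t))]
      rw [step1, step2]
      omega
    have hfc : (PySem.List.pyRange 0 t 1).filter (fun c => decide ((t - c) * c > b)) =
        (PySem.List.pyRange 0 t 1).filter
          (fun c => decide (PySem.Int.floordiv (t - r + 1) 2 ≤ c ∧
            c ≤ PySem.Int.floordiv (t + r) 2)) :=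
      List.filter_congr (fun c _ => decide_eq_decide.mpr (key c))
    rw [hfc, filter_pyRange_interval]
    have e1 : max (0 : Int) (PySem.Int.floordiv (t - r + 1) 2) =
        max (PySem.Int.floordiv (t - r + 1) 2) 0 := max_comm _ _
    have e2 : min t (PySem.Int.floordiv (t + r) 2 + 1) =
        min (PySem.Int.floordiv (t + r) 2) (t - 1) + 1 := by
      rw [hfd2]; omega
    rw [e1, e2]
    exact List.map_congr_left (fun c _ => by ring)
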